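-- pv_equiv track=rewrite | github.com/left-no-crumbz/pyshell | app/input_parser.py | parse_quoted_command
-- ===== SOURCE A (Python) =====
-- from typing import Optional, Union
--
-- def parse_quoted_command(input_str: str) -> tuple[str, Optional[str]]:
--     quote_char = input_str[0]
--     remaining = iter(input_str[1:])
--
--     command_parts = []
--     args_parts = []
--     in_quotes = True
--
--     for char in remaining:
--         if char == quote_char:
--             in_quotes = not in_quotes
--             continue
--         if in_quotes:
--             command_parts.append(char)
--         else:
--             args_parts.append(char)
--
--     command = quote_char + "".join(command_parts) + quote_char
--     args = "".join(args_parts).strip()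
--
--     return command, args if args else None
-- ===== SOURCE B (Python) =====
-- from typing import Optional
--
--
-- def parse_quoted_command(input_str: str) -> tuple[str, Optional[str]]:
--     quote_char = input_str[0]
--     parts = input_str[1:].split(quote_char)
--     command = quote_char + "".join(parts[0::2]) + quote_char
--     args = "".join(parts[1::2]).strip()
--     return command, args if args else None
-- ===== Notes on version B (the rewrite author's own statement) =====
-- stated objective: idiomatic
-- what changed: Replaced the stateful per-character quote-toggle loop with a single split on the quote char, routing the resulting segments by index parity (even segments joined into the command, odd segments joined and stripped into the args).
import Mathlib
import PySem

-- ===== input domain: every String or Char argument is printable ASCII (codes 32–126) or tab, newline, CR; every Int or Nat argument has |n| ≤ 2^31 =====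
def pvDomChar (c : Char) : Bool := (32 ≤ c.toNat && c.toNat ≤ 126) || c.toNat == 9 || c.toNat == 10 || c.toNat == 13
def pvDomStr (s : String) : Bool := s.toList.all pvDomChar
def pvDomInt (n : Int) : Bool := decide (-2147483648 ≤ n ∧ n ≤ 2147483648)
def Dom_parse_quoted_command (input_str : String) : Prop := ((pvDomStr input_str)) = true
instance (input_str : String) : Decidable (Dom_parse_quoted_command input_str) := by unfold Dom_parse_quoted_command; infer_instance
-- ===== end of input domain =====

-- B replaces A's per-character quote-toggle loop by one split on the quote char and parity routing
-- of the resulting segments (even segments -> command, odd segments -> args); return values only.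

-- ===== PORT A =====
def parse_quoted_command (input_str : String) : String × Option String :=
  match PySem.Str.pyGet? input_str 0 with
  | none => ("", none)   -- input_str[0] raises IndexError here; excluded by Pre_
  | some q =>
    let rest := (PySem.Str.slice input_str (some 1) none).toList
    let st := rest.foldl (fun (s : Bool × List Char × List Char) c =>
      if c = q then (!s.1, s.2.1, s.2.2)
      else if s.1 then (s.1, s.2.1 ++ [c], s.2.2)
      else (s.1, s.2.1, s.2.2 ++ [c])) (true, [], [])
    let command := String.mk (q :: st.2.1 ++ [q])
    let args := PySem.Chars.strip st.2.2
    (command, if args = [] then none else some (String.mk args))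

-- ===== PORT B =====
def parse_quoted_command_alt (input_str : String) : String × Option String :=
  match PySem.Str.pyGet? input_str 0 with
  | none => ("", none)   -- input_str[0] raises IndexError here; excluded by Pre_
  | some q =>
    let parts := (PySem.Chars.split? (PySem.Str.slice input_str (some 1) none).toList [q]).getD []
    let command := String.mk (q :: PySem.Chars.join [] ((PySem.List.slice? parts (some 0) none 2).getD []) ++ [q])
    let args := PySem.Chars.strip (PySem.Chars.join [] ((PySem.List.slice? parts (some 1) none 2).getD []))
    (command, if args = [] then none else some (String.mk args))

-- ===== PRECONDITION & SPEC =====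
-- Pre_ excludes only the empty string, on which Python A (and B) raises IndexError at input_str[0].
def Pre_parse_quoted_command (input_str : String) : Prop := input_str ≠ ""
instance (input_str : String) : Decidable (Pre_parse_quoted_command input_str) := by unfold Pre_parse_quoted_command; infer_instance
def pvWitness_parse_quoted_command : String := "'ls' -la"
def Spec_parse_quoted_command (input_str : String) (out : String × Option String) : Prop := out = parse_quoted_command_alt input_str
instance (input_str : String) (out : String × Option String) : Decidable (Spec_parse_quoted_command input_str out) := by unfold Spec_parse_quoted_command; infer_instance

-- ===== CLAIM (what is proved, stated in full; the proofs are below) =====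
def Claim_equal_parse_quoted_command : Prop := ∀ (input_str : String), Dom_parse_quoted_command input_str → Pre_parse_quoted_command input_str → Spec_parse_quoted_command input_str (parse_quoted_command input_str)

-- ===== LEMMAS AND PROOFS =====

-- split on a single char: first segment plus remaining segments
def splitc (q : Char) : List Char → List Char × List (List Char)
  | [] => ([], [])
  | c :: t => if c = q then ([], (splitc q t).1 :: (splitc q t).2)
              else (c :: (splitc q t).1, (splitc q t).2)

mutual
  -- elements at even / odd positions
  def evL {α : Type} : List α → List α
    | [] => []
    | p :: ps => p :: odL ps
  def odL {α : Type} : List α → List α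
    | [] => []
    | _ :: ps => evL ps
end

mutual
  -- flattened even / odd segments
  def evJ : List (List Char) → List Char
    | [] => []
    | p :: ps => p ++ odJ ps
  def odJ : List (List Char) → List Char
    | [] => []
    | _ :: ps => evJ ps
end

theorem join_empty_cons (a : List Char) (l : List (List Char)) :
    PySem.Chars.join [] (a :: l) = a ++ PySem.Chars.join [] l := by
  cases l with
  | nil => simp [PySem.Chars.join_singleton, PySem.Chars.join_nil]
  | cons b t => rw [PySem.Chars.join_cons_cons]; simp

theorem join_ev_od (xs : List (List Char)) :
    PySem.Chars.join [] (evL xs) = evJ xs ∧ PySem.Chars.join [] (odL xs) = odJ xs := by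
  induction xs with
  | nil => simp [evL, odL, evJ, odJ, PySem.Chars.join_nil]
  | cons p ps ih => simp [evL, odL, evJ, odJ, join_empty_cons, ih.1, ih.2]

theorem splitOn_go_eq (q : Char) (fuel : Nat) :
    ∀ (l cur : List Char) (acc : List (List Char)), l.length ≤ fuel →
    PySem.Chars.splitOn.go [q] fuel l cur acc =
      acc.reverse ++ (cur.reverse ++ (splitc q l).1) :: (splitc q l).2 := by
  induction fuel with
  | zero =>
    intro l cur acc h
    have : l = [] := by cases l <;> simp_all
    subst this
    simp [PySem.Chars.splitOn.go, splitc]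
  | succ fuel ih =>
    intro l cur acc h
    cases l with
    | nil => simp [PySem.Chars.splitOn.go, splitc]
    | cons c rest =>
      by_cases hc : c = q
      · subst hc
        rw [show PySem.Chars.splitOn.go [c] (fuel+1) (c :: rest) cur acc
              = PySem.Chars.splitOn.go [c] fuel rest [] (cur.reverse :: acc) by
            simp [PySem.Chars.splitOn.go, List.isPrefixOf]]
        rw [ih rest [] (cur.reverse :: acc) (by simpa using Nat.le_of_succ_le_succ h)]
        simp [splitc]
      · rw [show PySem.Chars.splitOn.go [q] (fuel+1) (c :: rest) cur acc
              = PySem.Chars.splitOn.go [q] fuel rest (c :: cur) acc by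
            simp [PySem.Chars.splitOn.go, List.isPrefixOf, Ne.symm hc]]
        rw [ih rest (c :: cur) acc (by simpa using Nat.le_of_succ_le_succ h)]
        simp [splitc, hc]

theorem splitOn_eq (q : Char) (l : List Char) :
    PySem.Chars.splitOn l [q] = (splitc q l).1 :: (splitc q l).2 := by
  rw [PySem.Chars.splitOn, splitOn_go_eq q (l.length + 1) l [] [] (by omega)]
  simp

theorem loopA (q : Char) (l : List Char) :
    ∀ (inq : Bool) (cmd args : List Char), ∃ b,
    l.foldl (fun (s : Bool × List Char × List Char) c =>
      if c = q then (!s.1, s.2.1, s.2.2)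
      else if s.1 then (s.1, s.2.1 ++ [c], s.2.2)
      else (s.1, s.2.1, s.2.2 ++ [c])) (inq, cmd, args) =
      (b, cmd ++ (if inq then evJ ((splitc q l).1 :: (splitc q l).2) else odJ ((splitc q l).1 :: (splitc q l).2)),
          args ++ (if inq then odJ ((splitc q l).1 :: (splitc q l).2) else evJ ((splitc q l).1 :: (splitc q l).2))) := by
  induction l with
  | nil =>
    intro inq cmd args
    exact ⟨inq, by cases inq <;> simp [splitc, evJ, odJ]⟩
  | cons c t ih =>
    intro inq cmd args
    by_cases hc : c = q
    · subst hc
      obtain ⟨b, hb⟩ := ih (!inq) cmd args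
      refine ⟨b, ?_⟩
      rw [List.foldl_cons, if_pos rfl]
      rw [hb]
      rcases h : splitc c t with ⟨p1, ps⟩
      cases inq <;> simp [splitc, h, evJ, odJ]
    · obtain ⟨b, hb⟩ := ih inq (cmd ++ (if inq then [c] else [])) (args ++ (if inq then [] else [c]))
      refine ⟨b, ?_⟩
      rw [List.foldl_cons, if_neg hc]
      rcases h : splitc q t with ⟨p1, ps⟩
      cases inq <;> simp_all [splitc, evJ, odJ]

theorem core_ev {α : Type} : ∀ (xs : List α),
    List.filterMap (fun k => xs[2 * k]?) (List.range ((xs.length + 1) / 2)) = evL xs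
  | [] => by simp [evL]
  | [p] => by simp [evL, odL]
  | p :: b :: t => by
    have ih := core_ev t
    have hc : ((p :: b :: t).length + 1) / 2 = (t.length + 1) / 2 + 1 := by
      simp; omega
    rw [hc, List.range_succ_eq_map, List.filterMap_cons, List.filterMap_map]
    have hidx : ((fun k => (p :: b :: t)[2 * k]?) ∘ Nat.succ) = (fun k => t[2 * k]?) := by
      funext k
      have h2 : 2 * Nat.succ k = 2 * k + 1 + 1 := by omega
      simp [h2]
    simp only [hidx, ih]
    simp [evL, odL]
termination_by xs => xs.length

theorem slice_ev {α : Type} (xs : List α) :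
    PySem.List.slice? xs (some 0) none 2 = some (evL xs) := by
  rw [PySem.List.slice?]
  simp only [PySem.List.sliceIndices]
  norm_num
  have hc : (if 0 < xs.length then (((xs.length:ℤ) + 2 - 1) / 2).toNat else 0) = (xs.length + 1) / 2 := by
    split_ifs with h <;> omega
  have hf : (fun x : ℕ => xs[(2 * (x:ℤ)).toNat]?) = (fun k : ℕ => xs[2*k]?) := by
    funext k
    have h2 : (2 * (k:ℤ)).toNat = 2 * k := by omega
    rw [h2]
  rw [hc, hf, core_ev]

theorem slice_od {α : Type} (xs : List α) :
    PySem.List.slice? xs (some 1) none 2 = some (odL xs) := by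
  rw [PySem.List.slice?]
  simp only [PySem.List.sliceIndices]
  norm_num
  cases xs with
  | nil => simp [odL]
  | cons p t =>
    have hm : min 1 (((p::t).length:ℤ)) = 1 := by simp
    rw [hm]
    have hc : (if 1 < (p::t).length then ((((p::t).length:ℤ) - 1 + 2 - 1) / 2).toNat else 0) = (t.length + 1) / 2 := by
      split_ifs with h <;> simp_all <;> omega
    have hf : (fun x : ℕ => (p::t)[(1 + 2 * (x:ℤ)).toNat]?) = (fun k : ℕ => t[2*k]?) := by
      funext k
      have h2 : (1 + 2 * (k:ℤ)).toNat = 2 * k + 1 := by omega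
      rw [h2]
      simp
    rw [hc, hf, core_ev]
    rfl

-- ===== VERDICT (by name: the statement is the Claim_ definition above) =====
theorem parse_quoted_command_spec : Claim_equal_parse_quoted_command := by
  intro input_str _ hpre
  unfold Spec_parse_quoted_command parse_quoted_command parse_quoted_command_alt
  have htl : input_str.toList ≠ [] := by
    intro h
    exact hpre (String.toList_eq_nil_iff.mp h)
  rcases hq : PySem.Str.pyGet? input_str 0 with _ | q
  · exfalso
    simp only [PySem.Str.pyGet?, PySem.Chars.pyGet?_eq_listPyGet?, PySem.List.pyGet?] at hq
    cases h : input_str.toList with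
    | nil => exact absurd h htl
    | cons c t => rw [h] at hq; simp [PySem.List.pyIdx?] at hq
  · have hrest : (PySem.Str.slice input_str (some 1) none).toList = input_str.toList.tail := by
      rw [PySem.Str.toList_slice, PySem.Chars.slice_eq_listSlice, PySem.List.slice_from_one]
    dsimp only
    rw [hrest]
    rcases hsp : splitc q input_str.toList.tail with ⟨p1, ps⟩
    obtain ⟨b, hb⟩ := loopA q input_str.toList.tail true [] []
    rw [hsp] at hb
    rw [hb]
    have hparts : (PySem.Chars.split? input_str.toList.tail [q]).getD [] = p1 :: ps := by
      rw [PySem.Chars.split?]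
      simp [splitOn_eq, hsp]
    rw [hparts, slice_ev, slice_od]
    simp [join_ev_od]
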